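-- pv_equiv track=rewrite | github.com/pypi-data/pypi-mirror-361 | packages/kapipe/kapipe-0.0.5-py3-none-any.whl/kapipe/models/biaffinener_model.py | get_subtoken_index_to_sentence_index
-- ===== SOURCE A (Python) =====
-- def get_subtoken_index_to_sentence_index(segments, doc_sentence_end):
--     """
--     Parameters
--     ----------
--     segments : list[list[str]]
--     doc_sentence_end : list[bool]
--
--     Returns
--     -------
--     list[int]
--     """
--     assert len(doc_sentence_end) == sum([len(seg) - 2 for seg in segments])
--     sent_map = [] # list[int]
--     sent_idx, subtok_idx = 0, 0
--     for segment in segments: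
--         sent_map.append(sent_idx) # [CLS]
--         length = len(segment) - 2
--         for i in range(length):
--             sent_map.append(sent_idx)
--             sent_idx += int(doc_sentence_end[subtok_idx]) # 0 or 1
--             subtok_idx += 1
--         # [SEP] is the current sentence's last token
--         sent_map.append(sent_idx - 1)
--     return sent_map
-- ===== SOURCE B (Python) =====
-- def get_subtoken_index_to_sentence_index(segments, doc_sentence_end):
--     assert len(doc_sentence_end) == sum([len(seg) - 2 for seg in segments])
--     # pre[k] = number of sentence ends among the first k content subtokens
--     pre = [0]
--     for end in doc_sentence_end:
--         pre.append(pre[-1] + int(end))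
--     lengths = [len(seg) - 2 for seg in segments]
--     starts = [0]
--     for length in lengths:
--         starts.append(starts[-1] + length)
--     out = []
--     for length, start in zip(lengths, starts):
--         out += [pre[start]] + pre[start:start + length] + [pre[start + length] - 1]
--     return out
-- ===== Notes on version B (the rewrite author's own statement) =====
-- stated objective: alternative
-- what changed: Replaces the single pass with an inline running sentence counter by precomputed prefix-sum and segment-start tables, assembling the output from table lookups and list slices instead of an incrementally updated counter.
import Mathlib
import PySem

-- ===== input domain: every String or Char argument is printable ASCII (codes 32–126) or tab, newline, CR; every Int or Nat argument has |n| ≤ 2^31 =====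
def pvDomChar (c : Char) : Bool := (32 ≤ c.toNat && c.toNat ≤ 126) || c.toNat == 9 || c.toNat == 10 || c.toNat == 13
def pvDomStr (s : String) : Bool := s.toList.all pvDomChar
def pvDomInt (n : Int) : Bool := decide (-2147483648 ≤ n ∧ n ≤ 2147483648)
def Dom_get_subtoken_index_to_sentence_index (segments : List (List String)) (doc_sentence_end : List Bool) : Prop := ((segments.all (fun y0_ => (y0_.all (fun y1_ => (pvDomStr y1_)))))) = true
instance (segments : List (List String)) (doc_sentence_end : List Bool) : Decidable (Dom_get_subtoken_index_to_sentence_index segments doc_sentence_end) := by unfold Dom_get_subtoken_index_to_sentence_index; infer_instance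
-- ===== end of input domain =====

-- B replaces A's inline running sentence counter by precomputed prefix-sum and segment-start
-- tables, assembling the output from table lookups and slices (same return value on Pre_).


-- ===== PORT A =====
-- the assert (and the IndexError reads past the end would raise) is excluded by Pre_;
-- inside Pre_ every read doc_sentence_end[subtok_idx] is in range, so pyGetD is exact there
def get_subtoken_index_to_sentence_index (segments : List (List String)) (doc_sentence_end : List Bool) : List Int :=
  (segments.foldl
    (fun (st : List Int × Int × Int) segment =>
      let sent_map := st.1 ++ [st.2.1]                     -- sent_map.append(sent_idx)  # [CLS]
      let length : Int := (segment.length : Int) - 2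
      let st2 := (PySem.List.pyRange 0 length 1).foldl     -- for i in range(length)
        (fun (st : List Int × Int × Int) _i =>
          (st.1 ++ [st.2.1],
           st.2.1 + (if PySem.List.pyGetD doc_sentence_end st.2.2 false then 1 else 0),
           st.2.2 + 1))
        (sent_map, st.2.1, st.2.2)
      (st2.1 ++ [st2.2.1 - 1], st2.2.1, st2.2.2))          -- sent_map.append(sent_idx - 1)  # [SEP]
    ([], 0, 0)).1

-- ===== PORT B =====
-- pre[-1] is PySem.List.pyGetD pre (-1) 0; pre[start] / pre[start+length] are in range inside Pre_,
-- so pyGetD is exact there; pre[start:start+length] is PySem.List.slice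
def get_subtoken_index_to_sentence_index_alt (segments : List (List String)) (doc_sentence_end : List Bool) : List Int :=
  let pre := doc_sentence_end.foldl
    (fun (pre : List Int) e => pre ++ [PySem.List.pyGetD pre (-1) 0 + (if e then 1 else 0)]) [0]
  let lengths := segments.map (fun seg => ((seg.length : Int) - 2))
  let starts := lengths.foldl
    (fun (st : List Int) L => st ++ [PySem.List.pyGetD st (-1) 0 + L]) [0]
  (lengths.zip starts).foldl
    (fun (out : List Int) (p : Int × Int) =>
      out ++ [PySem.List.pyGetD pre p.2 0]
          ++ PySem.List.slice pre (some p.2) (some (p.2 + p.1))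
          ++ [PySem.List.pyGetD pre (p.2 + p.1) 0 - 1]) []

-- ===== PRECONDITION & SPEC =====
-- Pre_ = exactly the inputs on which the Python A returns: the assert holds, and every segment has
-- length ≥ 2 (a segment of length < 2 that still satisfies the assert forces a later
-- doc_sentence_end read past the end, an IndexError)
def Pre_get_subtoken_index_to_sentence_index (segments : List (List String)) (doc_sentence_end : List Bool) : Prop :=
  (∀ seg ∈ segments, 2 ≤ seg.length) ∧
  (doc_sentence_end.length : Int) = (segments.map (fun seg => ((seg.length : Int) - 2))).sum

instance (segments : List (List String)) (doc_sentence_end : List Bool) : Decidable (Pre_get_subtoken_index_to_sentence_index segments doc_sentence_end) := by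
  unfold Pre_get_subtoken_index_to_sentence_index; infer_instance

def pvWitness_get_subtoken_index_to_sentence_index : List (List String) × List Bool :=
  ([["[CLS]", "hello", "world", "[SEP]"], ["[CLS]", "bye", "[SEP]"]], [true, false, true])

def Spec_get_subtoken_index_to_sentence_index (segments : List (List String)) (doc_sentence_end : List Bool) (out : List Int) : Prop := out = get_subtoken_index_to_sentence_index_alt segments doc_sentence_end
instance (segments : List (List String)) (doc_sentence_end : List Bool) (out : List Int) : Decidable (Spec_get_subtoken_index_to_sentence_index segments doc_sentence_end out) := by unfold Spec_get_subtoken_index_to_sentence_index; infer_instance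

-- ===== CLAIM (what is proved, stated in full; the proofs are below) =====
def Claim_equal_get_subtoken_index_to_sentence_index : Prop := ∀ (segments : List (List String)) (doc_sentence_end : List Bool), Dom_get_subtoken_index_to_sentence_index segments doc_sentence_end → Pre_get_subtoken_index_to_sentence_index segments doc_sentence_end → Spec_get_subtoken_index_to_sentence_index segments doc_sentence_end (get_subtoken_index_to_sentence_index segments doc_sentence_end)

-- ===== LEMMAS AND PROOFS =====

-- prefix sums: psum ys k = sum of the first k entries of ys
def psum (ys : List Int) (k : Nat) : Int := (ys.take k).sum

-- scanAdd a ys = [a, a + ys[0], a + ys[0] + ys[1], …]  (length ys.length + 1)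
def scanAdd (a : Int) : List Int → List Int
  | [] => [a]
  | y :: t => a :: scanAdd (a + y) t

-- the common reference value: for each segment length n (content subtokens), starting at content
-- offset s, emit psum ys s ([CLS]), psum ys (s+i) for i < n, psum ys (s+n) - 1 ([SEP])
def refMap (ys : List Int) (s : Nat) : List Nat → List Int
  | [] => []
  | n :: t =>
      (psum ys s :: ((List.range n).map (fun i => psum ys (s + i)) ++ [psum ys (s + n) - 1]))
        ++ refMap ys (s + n) t

-- cast a list of Nats to Ints
def natsToInts : List Nat → List Int
  | [] => []
  | n :: t => (n : Int) :: natsToInts t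

theorem natsToInts_cons (n : Nat) (t : List Nat) :
    natsToInts (n :: t) = (n : Int) :: natsToInts t := rfl

theorem natsToInts_eq_map (ns : List Nat) : natsToInts ns = ns.map Nat.cast := by
  induction ns with
  | nil => rfl
  | cons n t ih => rw [natsToInts_cons, List.map_cons, ih]

theorem psum_succ (ys : List Int) (k : Nat) (h : k < ys.length) :
    psum ys (k + 1) = psum ys k + ys[k] := by
  simp only [psum]
  exact List.sum_take_succ ys k h

theorem psum_cons_succ (y : Int) (t : List Int) (k : Nat) :
    psum (y :: t) (k + 1) = y + psum t k := by
  simp [psum, List.take_succ_cons]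

theorem psum_add (ys : List Int) (s i : Nat) :
    psum ys (s + i) = psum ys s + psum (ys.drop s) i := by
  simp [psum, List.take_add]

theorem scanAdd_getD (ys : List Int) : ∀ (a : Int) (k : Nat), k ≤ ys.length →
    (scanAdd a ys).getD k 0 = a + psum ys k := by
  induction ys with
  | nil =>
    intro a k hk
    have hk0 : k = 0 := by simpa using hk
    subst hk0; simp [scanAdd, psum]
  | cons y t ih =>
    intro a k hk
    cases k with
    | zero => simp [scanAdd, psum]
    | succ k =>
      rw [show scanAdd a (y :: t) = a :: scanAdd (a + y) t from rfl,
        List.getD_cons_succ, ih (a + y) k (by simpa using hk), psum_cons_succ]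
      ring

theorem scanAdd_drop (ys : List Int) : ∀ (a : Int) (s : Nat), s ≤ ys.length →
    (scanAdd a ys).drop s = scanAdd (a + psum ys s) (ys.drop s) := by
  induction ys with
  | nil =>
    intro a s hs
    have hs0 : s = 0 := by simpa using hs
    subst hs0; simp [psum]
  | cons y t ih =>
    intro a s hs
    cases s with
    | zero => simp [psum]
    | succ s =>
      rw [show scanAdd a (y :: t) = a :: scanAdd (a + y) t from rfl,
        List.drop_succ_cons, ih (a + y) s (by simpa using hs),
        List.drop_succ_cons, psum_cons_succ]
      congr 1
      ring

theorem scanAdd_take (ys : List Int) : ∀ (a : Int) (n : Nat), n ≤ ys.length →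
    (scanAdd a ys).take n = (List.range n).map (fun i => a + psum ys i) := by
  induction ys with
  | nil =>
    intro a n hn
    have hn0 : n = 0 := by simpa using hn
    subst hn0; simp
  | cons y t ih =>
    intro a n hn
    cases n with
    | zero => simp
    | succ n =>
      rw [show scanAdd a (y :: t) = a :: scanAdd (a + y) t from rfl,
        List.take_succ_cons, ih (a + y) n (by simpa using hn), List.range_succ_eq_map,
        List.map_cons, List.map_map]
      congr 1
      · simp [psum]
      · apply List.map_congr_left
        intro i _
        simp [Function.comp, psum_cons_succ]
        ring

-- B's two accumulator folds build scanAdd tables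
theorem foldl_lastAdd {α : Type} (f : α → Int) : ∀ (l : List α) (acc : List Int) (a : Int),
    PySem.List.pyGetD acc (-1) 0 = a →
    l.foldl (fun st x => st ++ [PySem.List.pyGetD st (-1) 0 + f x]) acc
      = acc ++ (scanAdd a (l.map f)).tail := by
  intro l
  induction l with
  | nil => intro acc a _; simp [scanAdd]
  | cons x t ih =>
    intro acc a ha
    rw [List.foldl_cons, ha,
      ih (acc ++ [a + f x]) (a + f x) (PySem.List.pyGetD_neg_one_append_singleton acc (a + f x) 0),
      List.map_cons]
    show acc ++ [a + f x] ++ (scanAdd (a + f x) (t.map f)).tail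
        = acc ++ (scanAdd a (f x :: t.map f)).tail
    cases h : t.map f <;> simp [scanAdd, List.append_assoc]

-- A's inner loop (over range(length)) characterised
theorem innerA_spec (dse : List Bool) (n : Nat) :
    ∀ (s : Nat) (m : List Int), s + n ≤ dse.length →
    (PySem.List.pyRange 0 (n : Int) 1).foldl
        (fun (st : List Int × Int × Int) _i =>
          (st.1 ++ [st.2.1],
           st.2.1 + (if PySem.List.pyGetD dse st.2.2 false then 1 else 0),
           st.2.2 + 1))
        (m, psum (dse.map (fun e => if e then (1:Int) else 0)) s, (s : Int))
      = (m ++ (List.range n).map (fun i => psum (dse.map (fun e => if e then (1:Int) else 0)) (s + i)),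
         psum (dse.map (fun e => if e then (1:Int) else 0)) (s + n),
         ((s + n : Nat) : Int)) := by
  induction n with
  | zero => intro s m _; rw [show ((0:Nat):Int) = 0 from rfl, PySem.List.pyRange_one_eq_nil (by omega)]; simp
  | succ n ih =>
    intro s m hsn
    have h1 : ((n + 1 : Nat) : Int) = (n : Int) + 1 := by push_cast; ring
    rw [h1, PySem.List.pyRange_one_succ_right (show (0:Int) ≤ (n : Int) from by positivity),
      List.foldl_append]
    rw [ih s m (by omega)]
    have hlt : s + n < dse.length := by omega
    have hget : PySem.List.pyGetD dse ((s + n : Nat) : Int) false = dse[s + n] := by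
      rw [PySem.List.pyGetD_natCast, List.getD_eq_getElem dse false hlt]
    simp only [List.foldl_cons, List.foldl_nil, hget]
    refine Prod.ext ?_ (Prod.ext ?_ ?_)
    · simp [List.range_succ, List.append_assoc]
    · show psum _ (s + n) + _ = psum _ (s + (n+1))
      have := psum_succ (dse.map (fun e => if e then (1:Int) else 0)) (s + n) (by simpa using hlt)
      rw [show s + (n + 1) = (s + n) + 1 from rfl, this]
      simp [List.getElem_map]
    · show ((s + n : Nat) : Int) + 1 = ((s + (n+1) : Nat) : Int)
      push_cast; ring

-- A's outer loop characterised
theorem outerA_spec (dse : List Bool) :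
    ∀ (segs : List (List String)) (s : Nat) (m : List Int),
    (∀ seg ∈ segs, 2 ≤ seg.length) →
    s + (segs.map (fun seg => seg.length - 2)).sum ≤ dse.length →
    segs.foldl
      (fun (st : List Int × Int × Int) segment =>
        let sent_map := st.1 ++ [st.2.1]
        let length : Int := (segment.length : Int) - 2
        let st2 := (PySem.List.pyRange 0 length 1).foldl
          (fun (st : List Int × Int × Int) _i =>
            (st.1 ++ [st.2.1],
             st.2.1 + (if PySem.List.pyGetD dse st.2.2 false then 1 else 0),
             st.2.2 + 1))
          (sent_map, st.2.1, st.2.2)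
        (st2.1 ++ [st2.2.1 - 1], st2.2.1, st2.2.2))
      (m, psum (dse.map (fun e => if e then (1:Int) else 0)) s, (s : Int))
      = (m ++ refMap (dse.map (fun e => if e then (1:Int) else 0)) s (segs.map (fun seg => seg.length - 2)),
         psum (dse.map (fun e => if e then (1:Int) else 0)) (s + (segs.map (fun seg => seg.length - 2)).sum),
         ((s + (segs.map (fun seg => seg.length - 2)).sum : Nat) : Int)) := by
  intro segs
  induction segs with
  | nil => intro s m _ _; simp [refMap]
  | cons seg t ih =>
    intro s m hlen hsum
    have h2 : 2 ≤ seg.length := hlen seg (by simp)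
    have hcast : ((seg.length : Int) - 2) = ((seg.length - 2 : Nat) : Int) := by omega
    rw [List.foldl_cons]
    simp only [hcast]
    rw [innerA_spec dse (seg.length - 2) s (m ++ [psum (dse.map (fun e => if e then (1:Int) else 0)) s])
      (by simp [List.sum_cons] at hsum; omega)]
    simp only []
    rw [ih (s + (seg.length - 2)) _ (fun x hx => hlen x (by simp [hx]))
      (by simp [List.sum_cons] at hsum; omega)]
    have hassoc : s + ((seg.length - 2) + (t.map (fun seg => seg.length - 2)).sum)
        = (s + (seg.length - 2)) + (t.map (fun seg => seg.length - 2)).sum := by omega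
    simp [refMap, List.append_assoc, List.sum_cons, hassoc]

-- B's output fold characterised (pre is the scanAdd table of the 0/1 list)
theorem outerB_spec (dse : List Bool) :
    ∀ (ns : List Nat) (s : Nat) (out : List Int),
    s + ns.sum ≤ dse.length →
    ((natsToInts ns).zip (scanAdd (s : Int) (natsToInts ns))).foldl
      (fun (out : List Int) (p : Int × Int) =>
        out ++ [PySem.List.pyGetD (scanAdd 0 (dse.map (fun e => if e then (1:Int) else 0))) p.2 0]
            ++ PySem.List.slice (scanAdd 0 (dse.map (fun e => if e then (1:Int) else 0))) (some p.2) (some (p.2 + p.1))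
            ++ [PySem.List.pyGetD (scanAdd 0 (dse.map (fun e => if e then (1:Int) else 0))) (p.2 + p.1) 0 - 1]) out
      = out ++ refMap (dse.map (fun e => if e then (1:Int) else 0)) s ns := by
  intro ns
  induction ns with
  | nil => intro s out _; simp [natsToInts, refMap]
  | cons n t ih =>
    intro s out hsum
    set ys := dse.map (fun e => if e then (1:Int) else 0) with hys
    have hyslen : ys.length = dse.length := by simp [hys]
    have hs : s ≤ ys.length := by rw [hyslen]; simp [List.sum_cons] at hsum; omega
    have hsn : s + n ≤ ys.length := by rw [hyslen]; simp [List.sum_cons] at hsum; omega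
    rw [natsToInts_cons,
      show scanAdd (s : Int) ((n : Int) :: natsToInts t)
        = (s : Int) :: scanAdd ((s : Int) + (n : Int)) (natsToInts t) from rfl,
      List.zip_cons_cons, List.foldl_cons]
    have hcast : ((s : Int) + (n : Int)) = ((s + n : Nat) : Int) := by push_cast; ring
    have hget1 : PySem.List.pyGetD (scanAdd 0 ys) ((s : Nat) : Int) 0 = psum ys s := by
      rw [PySem.List.pyGetD_natCast, scanAdd_getD ys 0 s hs]; ring
    have hget2 : PySem.List.pyGetD (scanAdd 0 ys) (((s : Int)) + (n : Int)) 0 = psum ys (s + n) := by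
      rw [hcast, PySem.List.pyGetD_natCast, scanAdd_getD ys 0 (s + n) hsn]; ring
    have hslice : PySem.List.slice (scanAdd 0 ys) (some (s : Int)) (some ((s : Int) + (n : Int)))
        = (List.range n).map (fun i => psum ys (s + i)) := by
      rw [PySem.List.slice_natCast_add, scanAdd_drop ys 0 s hs,
        scanAdd_take (ys.drop s) (0 + psum ys s) n (by simp [List.length_drop]; omega)]
      apply List.map_congr_left
      intro i hi
      rw [psum_add ys s i]; ring
    rw [hget1, hget2, hslice, hcast,
      ih (s + n) _ (by simp [List.sum_cons] at hsum; omega)]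
    simp [refMap, hys, List.append_assoc]

-- ===== VERDICT (by name: the statement is the Claim_ definition above) =====
theorem get_subtoken_index_to_sentence_index_spec : Claim_equal_get_subtoken_index_to_sentence_index := by
  intro segments dse _hdom hpre
  obtain ⟨hlen, hsum⟩ := hpre
  unfold Spec_get_subtoken_index_to_sentence_index
  unfold get_subtoken_index_to_sentence_index get_subtoken_index_to_sentence_index_alt
  -- natural segment lengths
  have hmapcast : segments.map (fun seg => ((seg.length : Int) - 2))
      = natsToInts (segments.map (fun seg => seg.length - 2)) := by
    rw [natsToInts_eq_map, List.map_map]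
    apply List.map_congr_left
    intro seg hseg
    have h2 := hlen seg hseg
    show (seg.length : Int) - 2 = ((seg.length - 2 : Nat) : Int)
    omega
  have hsum' : dse.length = (segments.map (fun seg => seg.length - 2)).sum := by
    rw [hmapcast, natsToInts_eq_map, ← Nat.cast_list_sum] at hsum
    exact_mod_cast hsum
  -- A side
  have hA := outerA_spec dse segments 0 [] hlen (by omega)
  rw [show ((0:Nat):Int) = (0:Int) from rfl] at hA
  rw [show psum (dse.map (fun e => if e then (1:Int) else 0)) 0 = 0 from rfl] at hA
  rw [hA]
  -- B side: pre table
  have hpre2 : dse.foldl (fun st x => st ++ [PySem.List.pyGetD st (-1) 0 + (if x then (1:Int) else 0)]) [0]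
      = scanAdd 0 (dse.map (fun e => if e then (1:Int) else 0)) := by
    rw [foldl_lastAdd (fun (e : Bool) => if e then (1:Int) else 0) dse [0] 0 (by decide)]
    cases h : dse.map (fun e => if e then (1:Int) else 0) <;> simp [scanAdd]
  -- B side: starts table
  have hst2 : (natsToInts (segments.map (fun seg => seg.length - 2))).foldl
      (fun st L => st ++ [PySem.List.pyGetD st (-1) 0 + L]) [0]
      = scanAdd ((0:Nat) : Int) (natsToInts (segments.map (fun seg => seg.length - 2))) := by
    rw [foldl_lastAdd (fun (L : Int) => L)
      (natsToInts (segments.map (fun seg => seg.length - 2))) [0] 0 (by decide),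
      List.map_id'' (fun _ => rfl)]
    cases h : natsToInts (segments.map (fun seg => seg.length - 2)) <;>
      simp [scanAdd]
  simp only [hmapcast, hpre2, hst2]
  rw [outerB_spec dse (segments.map (fun seg => seg.length - 2)) 0 [] (by omega)]
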